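-- pv_equiv track=rewrite | github.com/wesheets/personal-ai-agent | app/modules/orchestrator_scope.py | group_related_skills
-- ===== SOURCE A (Python) =====
-- from typing import List, Dict, Any, Optional
--
-- def group_related_skills(skills: List[str]) -> List[List[str]]:
--     """
--     Group related skills together for more coherent agent suggestions.
--
--     Args:
--         skills: List of skills
--
--     Returns:
--         List of skill groups
--     """
--     # Define skill relationships
--     skill_relationships = {
--         "reflect": ["summarize", "emotional_analysis"],
--         "summarize": ["reflect", "emotional_analysis"],
--         "emotional_analysis": ["reflect", "summarize"],
--         "delegate": ["execute"],
--         "execute": ["delegate"],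
--         "write": ["read"],
--         "read": ["write"],
--         "train": [],
--         "loop": [],
--         "task/status": []
--     }
--
--     # Initialize groups
--     groups = []
--     remaining_skills = skills.copy()
--
--     # Process skills
--     while remaining_skills:
--         # Take the first skill
--         current_skill = remaining_skills.pop(0)
--         current_group = [current_skill]
--
--         # Find related skills
--         related_skills = skill_relationships.get(current_skill, [])
--
--         # Add related skills to the group if they're in the remaining skills
--         for skill in related_skills:
--             if skill in remaining_skills:
--                 current_group.append(skill)
--                 remaining_skills.remove(skill)
--
--         # Add the group to the list of groups
--         groups.append(current_group)
--
--     return groups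
-- ===== SOURCE B (Python) =====
-- from typing import List
--
-- def group_related_skills(skills: List[str]) -> List[List[str]]:
--     """Group related skills together (single pass over indices with used-markers
--     instead of mutating a remaining list with pop(0)/remove)."""
--     skill_relationships = {
--         "reflect": ["summarize", "emotional_analysis"],
--         "summarize": ["reflect", "emotional_analysis"],
--         "emotional_analysis": ["reflect", "summarize"],
--         "delegate": ["execute"],
--         "execute": ["delegate"],
--         "write": ["read"],
--         "read": ["write"],
--         "train": [],
--         "loop": [],
--         "task/status": []
--     }
--     n = len(skills)
--     used = [False] * n
--     groups = []
--     for i in range(n):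
--         if used[i]:
--             continue
--         group = [skills[i]]
--         for rel in skill_relationships.get(skills[i], []):
--             for j in range(i + 1, n):
--                 if not used[j] and skills[j] == rel:
--                     used[j] = True
--                     group.append(rel)
--                     break
--         groups.append(group)
--     return groups
-- ===== Notes on version B (the rewrite author's own statement) =====
-- stated objective: faster
-- what changed: Replaces A's mutable remaining list with pop(0)/remove by a single index pass over the original list with a used-marker array, scanning forward only when a related skill must be consumed.
import Mathlib
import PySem

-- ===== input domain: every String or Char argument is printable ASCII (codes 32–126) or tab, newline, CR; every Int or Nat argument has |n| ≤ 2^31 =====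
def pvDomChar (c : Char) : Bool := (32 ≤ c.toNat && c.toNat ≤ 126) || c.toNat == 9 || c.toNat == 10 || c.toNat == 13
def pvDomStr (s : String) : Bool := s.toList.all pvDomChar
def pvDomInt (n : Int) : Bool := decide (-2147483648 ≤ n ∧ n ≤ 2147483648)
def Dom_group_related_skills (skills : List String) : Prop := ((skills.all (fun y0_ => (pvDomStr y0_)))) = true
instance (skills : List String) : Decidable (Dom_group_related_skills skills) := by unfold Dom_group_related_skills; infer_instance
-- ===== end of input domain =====

-- B replaces A's mutable remaining list (pop(0)/remove) by a single index pass
-- with a used-marker array; equivalence of return values is proved below.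


-- ===== PORT A =====
-- the literal dict 'skill_relationships' (same literal in Source A and Source B)
def skillRelationships : PySem.Dict String (List String) :=
  PySem.Dict.mk
    [ ("reflect", ["summarize", "emotional_analysis"])
    , ("summarize", ["reflect", "emotional_analysis"])
    , ("emotional_analysis", ["reflect", "summarize"])
    , ("delegate", ["execute"])
    , ("execute", ["delegate"])
    , ("write", ["read"])
    , ("read", ["write"])
    , ("train", [])
    , ("loop", [])
    , ("task/status", []) ]

-- skill_relationships.get(s, [])
def relatedOf (s : String) : List String := PySem.Dict.getD skillRelationships s []

-- body of A's inner 'for skill in related_skills' loop: state = (current_group, remaining_skills)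
def aInner (st : List String × List String) (r : String) : List String × List String :=
  if r ∈ st.2 then (st.1 ++ [r], (PySem.List.remove? st.2 r).getD st.2) else st

theorem aInner_len (st : List String × List String) (r : String) :
    ((aInner st r).2).length ≤ st.2.length := by
  unfold aInner
  split
  · rename_i h
    simp only [PySem.List.remove?_eq_some_erase st.2 r h]
    simp [h]
  · exact le_refl _

theorem foldl_aInner_len (rs : List String) (st : List String × List String) :
    ((rs.foldl aInner st).2).length ≤ st.2.length := by
  induction rs generalizing st with
  | nil => exact le_refl _
  | cons r rs ih => exact le_trans (ih _) (aInner_len st r)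

-- A's 'while remaining_skills' loop
def aLoop : List String → List (List String)
  | [] => []
  | cur :: rest =>
    let st := (relatedOf cur).foldl aInner ([cur], rest)
    st.1 :: aLoop st.2
termination_by l => l.length
decreasing_by
  exact Nat.lt_succ_of_le (foldl_aInner_len _ _)

def group_related_skills (skills : List String) : List (List String) := aLoop skills

-- ===== PORT B =====
-- Source B inner 'for j in range(i+1, n): … break': first j ≥ start with not used[j] and skills[j] == r
def bFind (skills : List String) (used : List Bool) (r : String) (j : Nat) : Option Nat :=
  if j < skills.length then
    if used.getD j false = false ∧ skills.getD j "" = r then some j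
    else bFind skills used r (j + 1)
  else none
termination_by skills.length - j

-- body of Source B's 'for rel in …' loop: state = (group, used)
def bInner (skills : List String) (i : Nat) (st : List String × List Bool) (r : String) :
    List String × List Bool :=
  match bFind skills st.2 r (i + 1) with
  | some j => (st.1 ++ [r], st.2.set j true)
  | none => st

-- Source B's 'for i in range(n)' loop
def bLoop (skills : List String) (i : Nat) (used : List Bool) : List (List String) :=
  if i < skills.length then
    if used.getD i false then bLoop skills (i + 1) used
    else
      let cur := skills.getD i ""
      let st := (relatedOf cur).foldl (bInner skills i) ([cur], used)
      st.1 :: bLoop skills (i + 1) st.2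
  else []
termination_by skills.length - i

def group_related_skills_alt (skills : List String) : List (List String) :=
  bLoop skills 0 (List.replicate skills.length false)

-- ===== PRECONDITION & SPEC =====
def Spec_group_related_skills (skills : List String) (out : List (List String)) : Prop := out = group_related_skills_alt skills
instance (skills : List String) (out : List (List String)) : Decidable (Spec_group_related_skills skills out) := by unfold Spec_group_related_skills; infer_instance

-- ===== CLAIM (what is proved, stated in full; the proofs are below) =====
def Claim_equal_group_related_skills : Prop := ∀ (skills : List String), Dom_group_related_skills skills → Spec_group_related_skills skills (group_related_skills skills)

-- ===== LEMMAS AND PROOFS =====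

-- the remaining-skills list of A, reconstructed from B's used markers
def mview : List String → List Bool → List String
  | s :: ss, b :: bs => if b then mview ss bs else s :: mview ss bs
  | _, _ => []

theorem mview_replicate (ss : List String) : mview ss (List.replicate ss.length false) = ss := by
  induction ss with
  | nil => rfl
  | cons s ss ih => simp [mview, List.replicate, ih]

theorem bFind_eq (skills : List String) (used : List Bool) (r : String) (j : Nat) :
    bFind skills used r j =
      if j < skills.length then
        if used.getD j false = false ∧ skills.getD j "" = r then some j
        else bFind skills used r (j + 1)
      else none := by
  rw [bFind]

theorem bLoop_eq (skills : List String) (i : Nat) (used : List Bool) :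
    bLoop skills i used =
      if i < skills.length then
        if used.getD i false then bLoop skills (i + 1) used
        else
          let cur := skills.getD i ""
          let st := (relatedOf cur).foldl (bInner skills i) ([cur], used)
          st.1 :: bLoop skills (i + 1) st.2
      else [] := by
  rw [bLoop]

theorem bFind_shift (s : String) (b : Bool) (r : String) :
    ∀ (fuel : Nat) (ss : List String) (bs : List Bool) (j : Nat), ss.length - j ≤ fuel →
      bFind (s :: ss) (b :: bs) r (j + 1) = (bFind ss bs r j).map (· + 1) := by
  intro fuel
  induction fuel with
  | zero =>
    intro ss bs j h
    have hj : ¬ j < ss.length := by omega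
    rw [bFind_eq (s :: ss) (b :: bs) r (j + 1), bFind_eq ss bs r j]
    simp [hj]
  | succ fuel ih =>
    intro ss bs j h
    rw [bFind_eq (s :: ss) (b :: bs) r (j + 1), bFind_eq ss bs r j]
    by_cases hj : j < ss.length
    · simp only [List.length_cons, List.getD_cons_succ]
      rw [if_pos (by omega : j + 1 < ss.length + 1), if_pos hj]
      by_cases hc : bs.getD j false = false ∧ ss.getD j "" = r
      · rw [if_pos hc, if_pos hc]; rfl
      · rw [if_neg hc, if_neg hc]
        exact ih ss bs (j + 1) (by omega)
    · simp [hj]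

-- relation between bFind at 0 and remove? on the view
theorem bFind_base (r : String) :
    ∀ (ss : List String) (bs : List Bool), bs.length = ss.length →
      (bFind ss bs r 0 = none → r ∉ mview ss bs) ∧
      (∀ k, bFind ss bs r 0 = some k →
        PySem.List.remove? (mview ss bs) r = some (mview ss (bs.set k true))) := by
  intro ss
  induction ss with
  | nil =>
    intro bs h
    have hb : bs = [] := List.eq_nil_of_length_eq_zero h
    subst hb
    refine ⟨fun _ => by simp [mview], fun k hk => ?_⟩
    rw [bFind_eq] at hk; simp at hk
  | cons s' ss' ih =>
    intro bs h
    match bs with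
    | b' :: bs' =>
      have h' : bs'.length = ss'.length := by simpa using h
      have hsh : bFind (s' :: ss') (b' :: bs') r 1 = (bFind ss' bs' r 0).map (· + 1) :=
        bFind_shift s' b' r ss'.length ss' bs' 0 (by omega)
      rw [bFind_eq]
      simp only [List.length_cons, List.getD_cons_zero]
      rw [if_pos (by omega : 0 < ss'.length + 1)]
      cases b' with
      | true =>
        rw [if_neg (by simp), hsh]
        have hm : mview (s' :: ss') (true :: bs') = mview ss' bs' := by simp [mview]
        constructor
        · intro hn
          have hnone : bFind ss' bs' r 0 = none := by
            cases hfind : bFind ss' bs' r 0 <;> simp [hfind] at hn ⊢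
          rw [hm]; exact (ih bs' h').1 hnone
        · intro k hk
          cases hfind : bFind ss' bs' r 0 with
          | none => rw [hfind] at hk; simp at hk
          | some k0 =>
            rw [hfind] at hk
            simp only [Option.map_some] at hk
            have hk0 : k = k0 + 1 := (Option.some.inj hk).symm
            subst hk0
            rw [hm]
            simp only [List.set_cons_succ]
            have hm2 : mview (s' :: ss') (true :: bs'.set k0 true) = mview ss' (bs'.set k0 true) := by
              simp [mview]
            rw [hm2]
            exact (ih bs' h').2 k0 hfind
      | false =>
        by_cases hs : s' = r
        · rw [if_pos ⟨rfl, hs⟩]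
          have hm : mview (s' :: ss') (false :: bs') = r :: mview ss' bs' := by
            simp [mview, hs]
          constructor
          · intro hn; simp at hn
          · intro k hk
            have hk0 : k = 0 := (Option.some.inj hk).symm
            subst hk0
            rw [hm, PySem.List.remove?_cons_self]
            simp [mview]
        · rw [if_neg (by simp [hs]), hsh]
          have hm : mview (s' :: ss') (false :: bs') = s' :: mview ss' bs' := by simp [mview]
          constructor
          · intro hn
            have hnone : bFind ss' bs' r 0 = none := by
              cases hfind : bFind ss' bs' r 0 <;> simp [hfind] at hn ⊢
            rw [hm]
            intro hmem
            rcases List.mem_cons.mp hmem with h1 | h2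
            · exact hs h1.symm
            · exact (ih bs' h').1 hnone h2
          · intro k hk
            cases hfind : bFind ss' bs' r 0 with
            | none => rw [hfind] at hk; simp at hk
            | some k0 =>
              rw [hfind] at hk
              simp only [Option.map_some] at hk
              have hk0 : k = k0 + 1 := (Option.some.inj hk).symm
              subst hk0
              simp only [List.set_cons_succ]
              have hm2 : mview (s' :: ss') (false :: bs'.set k0 true)
                  = s' :: mview ss' (bs'.set k0 true) := by simp [mview]
              rw [hm, hm2, PySem.List.remove?_cons_of_ne (mview ss' bs') hs,
                (ih bs' h').2 k0 hfind]
              rfl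

theorem fold_corr (s : String) (b : Bool) :
    ∀ (rs : List String) (grp : List String) (ss : List String) (bs : List Bool),
      bs.length = ss.length →
      ∃ bs', (rs.foldl (bInner (s :: ss) 0) (grp, b :: bs)).2 = b :: bs' ∧
        bs'.length = ss.length ∧
        (rs.foldl (bInner (s :: ss) 0) (grp, b :: bs)).1 = (rs.foldl aInner (grp, mview ss bs)).1 ∧
        mview ss bs' = (rs.foldl aInner (grp, mview ss bs)).2 := by
  intro rs
  induction rs with
  | nil =>
    intro grp ss bs h
    exact ⟨bs, rfl, h, rfl, rfl⟩
  | cons r rs ih =>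
    intro grp ss bs h
    simp only [List.foldl_cons]
    have hsh : bFind (s :: ss) (b :: bs) r 1 = (bFind ss bs r 0).map (· + 1) :=
      bFind_shift s b r ss.length ss bs 0 (by omega)
    cases hfind : bFind ss bs r 0 with
    | none =>
      have hb : bInner (s :: ss) 0 (grp, b :: bs) r = (grp, b :: bs) := by
        unfold bInner; rw [hsh, hfind]; rfl
      have ha : aInner (grp, mview ss bs) r = (grp, mview ss bs) := by
        unfold aInner
        rw [if_neg]
        exact (bFind_base r ss bs h).1 hfind
      rw [hb, ha]
      exact ih grp ss bs h
    | some k0 =>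
      have hrem := (bFind_base r ss bs h).2 k0 hfind
      have hb : bInner (s :: ss) 0 (grp, b :: bs) r = (grp ++ [r], b :: bs.set k0 true) := by
        unfold bInner; rw [hsh, hfind]; rfl
      have hmem : r ∈ mview ss bs := by
        by_contra hn
        rw [(PySem.List.remove?_eq_none_iff (mview ss bs) r).mpr hn] at hrem
        simp at hrem
      have ha : aInner (grp, mview ss bs) r = (grp ++ [r], mview ss (bs.set k0 true)) := by
        unfold aInner
        rw [if_pos hmem, hrem]
        rfl
      rw [hb, ha]
      exact ih (grp ++ [r]) ss (bs.set k0 true) (by simp [h])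

theorem bInner_shift (s : String) (b : Bool) (ss : List String) (bs : List Bool) (j : Nat)
    (grp : List String) (r : String) :
    bInner (s :: ss) (j + 1) (grp, b :: bs) r =
      ((bInner ss j (grp, bs) r).1, b :: (bInner ss j (grp, bs) r).2) := by
  unfold bInner
  rw [show (j + 1 + 1) = (j + 1) + 1 from rfl,
    bFind_shift s b r ss.length ss bs (j + 1) (by omega)]
  cases hfind : bFind ss bs r (j + 1) <;> simp

theorem fold_shift (s : String) (b : Bool) (ss : List String) (j : Nat) :
    ∀ (rs : List String) (grp : List String) (bs : List Bool),
      rs.foldl (bInner (s :: ss) (j + 1)) (grp, b :: bs) =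
        ((rs.foldl (bInner ss j) (grp, bs)).1, b :: (rs.foldl (bInner ss j) (grp, bs)).2) := by
  intro rs
  induction rs with
  | nil => intro grp bs; rfl
  | cons r rs ih =>
    intro grp bs
    simp only [List.foldl_cons]
    rw [bInner_shift s b ss bs j grp r, ih]

theorem bLoop_shift (s : String) (b : Bool) :
    ∀ (fuel : Nat) (ss : List String) (bs : List Bool) (j : Nat), ss.length - j ≤ fuel →
      bLoop (s :: ss) (j + 1) (b :: bs) = bLoop ss j bs := by
  intro fuel
  induction fuel with
  | zero =>
    intro ss bs j h
    have hj : ¬ j < ss.length := by omega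
    rw [bLoop_eq (s :: ss) (j + 1) (b :: bs), bLoop_eq ss j bs]
    simp [hj]
  | succ fuel ih =>
    intro ss bs j h
    rw [bLoop_eq (s :: ss) (j + 1) (b :: bs), bLoop_eq ss j bs]
    by_cases hj : j < ss.length
    · simp only [List.length_cons, List.getD_cons_succ]
      rw [if_pos (by omega : j + 1 < ss.length + 1), if_pos hj]
      by_cases hu : bs.getD j false
      · rw [if_pos hu, if_pos hu]
        exact ih ss bs (j + 1) (by omega)
      · rw [if_neg hu, if_neg hu]
        rw [fold_shift s b ss j]
        rw [ih ss _ (j + 1) (by omega)]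
    · simp [hj]

theorem main_corr : ∀ (ss : List String) (bs : List Bool), bs.length = ss.length →
    bLoop ss 0 bs = aLoop (mview ss bs) := by
  intro ss
  induction ss with
  | nil =>
    intro bs h
    have hb : bs = [] := List.eq_nil_of_length_eq_zero h
    subst hb
    rw [bLoop_eq]
    simp [mview, aLoop]
  | cons s ss' ih =>
    intro bs h
    match bs with
    | b :: bs' =>
      have h' : bs'.length = ss'.length := by simpa using h
      rw [bLoop_eq]
      simp only [List.length_cons, List.getD_cons_zero]
      rw [if_pos (by omega : 0 < ss'.length + 1)]
      cases b with
      | true =>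
        rw [if_pos rfl, bLoop_shift s true ss'.length ss' bs' 0 (by omega), ih bs' h']
        simp [mview]
      | false =>
        rw [if_neg (by simp)]
        obtain ⟨bs'', hst2, hlen, hst1, hmv⟩ := fold_corr s false (relatedOf s) [s] ss' bs' h'
        have hmA : mview (s :: ss') (false :: bs') = s :: mview ss' bs' := by simp [mview]
        rw [hmA, aLoop]
        rw [hst2, bLoop_shift s false ss'.length ss' bs'' 0 (by omega), ih bs'' hlen, hst1, hmv]

-- ===== VERDICT (by name: the statement is the Claim_ definition above) =====
theorem group_related_skills_spec : Claim_equal_group_related_skills := by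
  intro skills _
  unfold Spec_group_related_skills group_related_skills group_related_skills_alt
  rw [main_corr skills (List.replicate skills.length false) (by simp), mview_replicate]
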